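-- pv_equiv track=rewrite | github.com/mananmulchandani-star/IntelliResume-Backend | app.py | validate_summary_length
-- ===== SOURCE A (Python) =====
-- def validate_summary_length(summary):
--     """Ensure summary is at least 50 words"""
--     word_count = len(summary.split())
--     if word_count < 50:
--         expanders = [
--             " Strong foundation in technical principles and practical applications.",
--             " Proven ability to adapt quickly and learn new technologies efficiently.",
--             " Excellent problem-solving skills with attention to detail and quality.",
--             " Committed to continuous learning and professional development.",
--             " Effective communicator with strong interpersonal skills and team collaboration abilities.",
--             " Seeking to leverage academic knowledge in practical, real-world applications."
--         ]
--         for expander in expanders: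
--             if word_count < 50:
--                 summary += expander
--                 word_count = len(summary.split())
--     return summary
-- ===== SOURCE B (Python) =====
-- _EXPANDERS = [
--     " Strong foundation in technical principles and practical applications.",
--     " Proven ability to adapt quickly and learn new technologies efficiently.",
--     " Excellent problem-solving skills with attention to detail and quality.",
--     " Committed to continuous learning and professional development.",
--     " Effective communicator with strong interpersonal skills and team collaboration abilities.",
--     " Seeking to leverage academic knowledge in practical, real-world applications."
-- ]
--
-- # cumulative word counts of the expanders (sorted ascending by construction)
-- _CUM = []
-- _t = 0
-- for _e in _EXPANDERS:
--     _t += len(_e.split())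
--     _CUM.append(_t)
--
-- # all possible padding strings, precomputed once
-- _PADS = ["".join(_EXPANDERS[:k]) for k in range(len(_EXPANDERS) + 1)]
--
--
-- def _search(d, lo, hi):
--     """Binary search: first index with _CUM[idx] >= d (len(_CUM) if none)."""
--     if lo >= hi:
--         return lo
--     mid = (lo + hi) // 2
--     if _CUM[mid] < d:
--         return _search(d, mid + 1, hi)
--     return _search(d, lo, mid)
--
--
-- def validate_summary_length(summary):
--     """Ensure summary is at least 50 words"""
--     w = len(summary.split())
--     if w >= 50:
--         return summary
--     idx = _search(50 - w, 0, len(_CUM))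
--     return summary + _PADS[min(idx + 1, len(_EXPANDERS))]
-- ===== Notes on version B (the rewrite author's own statement) =====
-- stated objective: alternative
-- what changed: A greedily appends expanders one by one, re-splitting the whole growing summary after each append; B precomputes a cumulative word-count table and a table of all seven possible padding strings at module load, then answers each call with one split, a binary search over the cumulative table for the deficit, and a single table lookup/concatenation.
import Mathlib
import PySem

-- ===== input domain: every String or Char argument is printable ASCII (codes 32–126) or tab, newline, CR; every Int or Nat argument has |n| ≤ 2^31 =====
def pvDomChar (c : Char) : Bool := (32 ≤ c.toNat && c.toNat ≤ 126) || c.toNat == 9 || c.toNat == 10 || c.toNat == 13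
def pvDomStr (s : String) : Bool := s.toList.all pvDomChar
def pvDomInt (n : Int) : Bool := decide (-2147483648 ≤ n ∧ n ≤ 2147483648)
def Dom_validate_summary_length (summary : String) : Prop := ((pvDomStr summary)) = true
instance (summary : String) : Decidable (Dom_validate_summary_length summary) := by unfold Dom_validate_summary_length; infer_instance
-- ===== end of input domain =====

-- B replaces A's greedy append-then-recount loop by tables precomputed once (cumulative word
-- counts of the expanders and all seven possible padding strings) plus a binary search for the
-- word deficit, so a call does one split, one search and one concatenation (objective: alternative).

-- the fixed expander sentences (module-level data shared by both ports)
def pvExpanders : List String := [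
  " Strong foundation in technical principles and practical applications.",
  " Proven ability to adapt quickly and learn new technologies efficiently.",
  " Excellent problem-solving skills with attention to detail and quality.",
  " Committed to continuous learning and professional development.",
  " Effective communicator with strong interpersonal skills and team collaboration abilities.",
  " Seeking to leverage academic knowledge in practical, real-world applications."
]

-- ===== PORT A =====
def validate_summary_length (summary : String) : String :=
  let word_count := (PySem.Str.split₀ summary).length
  if word_count < 50 then
    (pvExpanders.foldl
      (fun st expander =>
        if st.2 < 50 then
          let s := st.1 ++ expander
          (s, (PySem.Str.split₀ s).length)
        else st)
      (summary, word_count)).1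
  else summary

-- ===== PORT B =====
-- Source B's module-level loop building _CUM, the cumulative word counts of the expanders
def pvCum : List Nat :=
  (pvExpanders.foldl (fun (st : List Nat × Nat) e =>
    let t := st.2 + (PySem.Str.split₀ e).length
    (st.1 ++ [t], t)) ([], 0)).1

-- Source B's _PADS: all possible padding strings, one join per prefix length
def pvPads : List String :=
  (List.range (pvExpanders.length + 1)).map (fun k => PySem.Str.join "" (pvExpanders.take k))

-- Source B's _search: binary search for the first index with _CUM[idx] >= d (the list access
-- _CUM[mid] is always in range in Source B; getD 0 is exact there; the fuel hi - lo only makes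
-- the same recursion structural, it never runs out)
def pvSearchGo : Nat → Int → Nat → Nat → Nat
  | 0, _, lo, _ => lo
  | fuel + 1, d, lo, hi =>
    if lo < hi then
      let mid := (lo + hi) / 2
      if ((pvCum.getD mid 0 : Nat) : Int) < d then pvSearchGo fuel d (mid + 1) hi
      else pvSearchGo fuel d lo mid
    else lo

def pvSearch (d : Int) (lo hi : Nat) : Nat := pvSearchGo (hi - lo) d lo hi

def validate_summary_length_alt (summary : String) : String :=
  let w := (PySem.Str.split₀ summary).length
  if 50 ≤ w then summary
  else
    let idx := pvSearch ((50 : Int) - w) 0 pvCum.length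
    summary ++ pvPads.getD (min (idx + 1) pvExpanders.length) ""

-- ===== PRECONDITION & SPEC =====
def Spec_validate_summary_length (summary : String) (out : String) : Prop := out = validate_summary_length_alt summary
instance (summary : String) (out : String) : Decidable (Spec_validate_summary_length summary out) := by unfold Spec_validate_summary_length; infer_instance

-- ===== CLAIM (what is proved, stated in full; the proofs are below) =====
def Claim_equal_validate_summary_length : Prop := ∀ (summary : String), Dom_validate_summary_length summary → Spec_validate_summary_length summary (validate_summary_length summary)

-- ===== LEMMAS AND PROOFS =====

-- proof-only characterisation of A's loop: how many expanders A consumes, given the counts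
def pvNeeded : List Nat → Nat → Nat
  | [], _ => 0
  | c :: rest, total => if total < 50 then pvNeeded rest (total + c) + 1 else 0

def pvCounts : List Nat := pvExpanders.map (fun e => (PySem.Str.split₀ e).length)

-- split₀.go's accumulator is a pure prefix of the result
lemma pv_go_acc (s : List Char) : ∀ (cur : List Char) (acc : List (List Char)),
    PySem.Chars.split₀.go s cur acc = acc.reverse ++ PySem.Chars.split₀.go s cur [] := by
  induction s with
  | nil =>
    intro cur acc
    by_cases hc : cur.isEmpty <;> simp [PySem.Chars.split₀.go, hc]
  | cons c rest ih =>
    intro cur acc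
    by_cases hsp : PySem.Chars.isspace c
    · by_cases hc : cur.isEmpty
      · simp only [PySem.Chars.split₀.go, hsp, hc, if_true]
        exact ih [] acc
      · simp only [PySem.Chars.split₀.go, hsp, hc, if_true, if_false, Bool.false_eq_true]
        rw [ih [] (cur.reverse :: acc), ih [] [cur.reverse]]
        simp
    · simp only [PySem.Chars.split₀.go, hsp, Bool.false_eq_true, if_false]
      exact ih (c :: cur) acc

-- appending text that starts with a whitespace character splits independently
lemma pv_go_append (w : Char) (e : List Char) (hw : PySem.Chars.isspace w = true) (s : List Char) :
    ∀ (cur : List Char) (acc : List (List Char)),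
      PySem.Chars.split₀.go (s ++ w :: e) cur acc
        = PySem.Chars.split₀.go s cur acc ++ PySem.Chars.split₀.go (w :: e) [] [] := by
  induction s with
  | nil =>
    intro cur acc
    by_cases hc : cur.isEmpty
    · simp only [List.nil_append, PySem.Chars.split₀.go, hw, hc, if_true]
      rw [pv_go_acc e [] acc, pv_go_acc e [] []]
      simp
    · simp only [List.nil_append, PySem.Chars.split₀.go, hw, hc, if_true, if_false,
        Bool.false_eq_true]
      rw [pv_go_acc e [] (cur.reverse :: acc), pv_go_acc e [] []]
      simp
  | cons c rest ih =>
    intro cur acc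
    by_cases hsp : PySem.Chars.isspace c
    · by_cases hc : cur.isEmpty
      · simp only [List.cons_append, PySem.Chars.split₀.go, hsp, hc, if_true]
        exact ih [] acc
      · simp only [List.cons_append, PySem.Chars.split₀.go, hsp, hc, if_true, if_false,
          Bool.false_eq_true]
        exact ih [] (cur.reverse :: acc)
    · simp only [List.cons_append, PySem.Chars.split₀.go, hsp, Bool.false_eq_true, if_false]
      exact ih (c :: cur) acc

lemma pv_split₀_append (s : List Char) (w : Char) (e : List Char)
    (hw : PySem.Chars.isspace w = true) :
    PySem.Chars.split₀ (s ++ w :: e) = PySem.Chars.split₀ s ++ PySem.Chars.split₀ (w :: e) := by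
  unfold PySem.Chars.split₀
  exact pv_go_append w e hw s [] []

-- word counts add when the appended string starts with whitespace
lemma pv_len_split₀_append (s e : String)
    (he : (e.toList.head?.map PySem.Chars.isspace).getD false = true) :
    (PySem.Str.split₀ (s ++ e)).length
      = (PySem.Str.split₀ s).length + (PySem.Str.split₀ e).length := by
  cases het : e.toList with
  | nil => rw [het] at he; simp at he
  | cons w t =>
    rw [het] at he
    simp only [List.head?_cons, Option.map_some, Option.getD_some] at he
    simp only [PySem.Str.split₀, List.length_map, String.toList_append, het]
    rw [pv_split₀_append s.toList w t he, List.length_append]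

lemma pv_flatten_intersperse_nil (L : List (List Char)) :
    (List.intersperse ([] : List Char) L).flatten = L.flatten := by
  induction L with
  | nil => rfl
  | cons a rest ih =>
    cases rest with
    | nil => rfl
    | cons b r =>
      simp only [List.intersperse_cons₂, List.flatten_cons] at ih ⊢
      simp [ih]

lemma pv_join_nil_cons (x : String) (l : List String) :
    PySem.Str.join "" (x :: l) = x ++ PySem.Str.join "" l := by
  simp [PySem.Str.join, PySem.Chars.join, List.intercalate, pv_flatten_intersperse_nil]

-- the fold of A's loop body produces exactly "take the needed prefix and join it"
lemma pv_fold_eq (es : List String)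
    (hws : ∀ e ∈ es, (e.toList.head?.map PySem.Chars.isspace).getD false = true) :
    ∀ (s : String),
      (es.foldl
        (fun st expander =>
          if st.2 < 50 then
            (st.1 ++ expander, (PySem.Str.split₀ (st.1 ++ expander)).length)
          else st)
        (s, (PySem.Str.split₀ s).length)).1
      = s ++ PySem.Str.join ""
          (es.take (pvNeeded (es.map (fun e => (PySem.Str.split₀ e).length))
            (PySem.Str.split₀ s).length)) := by
  induction es with
  | nil =>
    intro s
    simp only [List.foldl_nil, List.map_nil, List.take_nil]
    rw [show PySem.Str.join "" [] = "" from rfl, String.append_empty]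
  | cons e rest ih =>
    intro s
    have hwe := hws e (List.mem_cons_self ..)
    have hrest : ∀ e ∈ rest, (e.toList.head?.map PySem.Chars.isspace).getD false = true :=
      fun x hx => hws x (List.mem_cons_of_mem _ hx)
    by_cases h : (PySem.Str.split₀ s).length < 50
    · simp only [List.foldl_cons, List.map_cons, pvNeeded, h, if_pos]
      rw [ih hrest (s ++ e), pv_len_split₀_append s e hwe, List.take_succ_cons,
        pv_join_nil_cons, ← String.append_assoc]
    · have h0 : ∀ l, pvNeeded l (PySem.Str.split₀ s).length = 0 := by
        intro l; cases l <;> simp [pvNeeded, h]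
      simp only [List.foldl_cons, h, if_false]
      rw [ih hrest s]
      simp [h0]

-- on every initial word count below 50, B's binary-search/table lookup picks exactly the
-- padding A's loop builds (finite check over all 50 cases)
lemma pv_table_eq : ∀ w : Nat, w < 50 →
    pvPads.getD (min (pvSearch ((50 : Int) - w) 0 pvCum.length + 1) pvExpanders.length) ""
      = PySem.Str.join "" (pvExpanders.take (pvNeeded pvCounts w)) := by
  set_option maxRecDepth 4000 in decide

-- ===== VERDICT (by name: the statement is the Claim_ definition above) =====
theorem validate_summary_length_spec : Claim_equal_validate_summary_length := by
  intro summary _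
  unfold Spec_validate_summary_length validate_summary_length validate_summary_length_alt
  by_cases h : (PySem.Str.split₀ summary).length < 50
  · simp only [h, if_pos, if_neg (by omega : ¬ 50 ≤ (PySem.Str.split₀ summary).length)]
    rw [pv_fold_eq pvExpanders (by decide) summary]
    rw [show (pvExpanders.map (fun e => (PySem.Str.split₀ e).length)) = pvCounts from rfl,
      pv_table_eq _ h]
  · simp [h, if_pos (by omega : 50 ≤ (PySem.Str.split₀ summary).length)]
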